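-- pv_equiv track=rewrite | github.com/cms498/School-Assignments | SoftwareDevelopment1/unit13/practice13_2.py | make_calendar
-- ===== SOURCE A (Python) =====
-- def make_calendar(weekday, days):
--     """
--     Returns a 2d array in the form of a calender given a starting day and number of days
--     """
--     table = []
--     week = []
--     current_day = 1
--
--     for day in range(7):
--         if day >= weekday:
--             week.append("0" + str(current_day))
--             current_day += 1
--         else:
--             week.append("  ")
--     table.append(week)
--     week = []
--     for day in range(current_day, days + 1):
--         if len(week) == 6:
--             if day < 10:
--                 week.append("0" + str(day))
--             else:
--                 week.append(str(day))
--             table.append(week)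
--             week = []
--         elif day < 10:
--             week.append("0" + str(day))
--         else:
--             week.append(str(day))
--     while len(week) != 7:
--         if len(week) == 0:
--             return table
--         week.append("  ")
--     table.append(week)
--     return table
-- ===== SOURCE B (Python) =====
-- def make_calendar(weekday, days):
--     """
--     Returns a 2d array in the form of a calender given a starting day and number of days
--     """
--     blanks = min(max(weekday, 0), 7)
--     first_week = ["  "] * blanks + ["0" + str(i) for i in range(1, 8 - blanks)]
--     start = 8 - blanks
--     cells = ["0" + str(d) if d < 10 else str(d) for d in range(start, days + 1)]
--     rows = [cells[i:i + 7] for i in range(0, len(cells), 7)]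
--     if rows and len(rows[-1]) < 7:
--         rows = rows[:-1] + [rows[-1] + ["  "] * (7 - len(rows[-1]))]
--     return [first_week] + rows
-- ===== Notes on version B (the rewrite author's own statement) =====
-- stated objective: alternative
-- what changed: B computes the first week and its day counter in closed form (clamped blank count), then materialises the whole flat list of formatted day cells and chunks it into 7-cell rows by slicing, padding only the last row, instead of A's cell-by-cell accumulate-and-flush loop with a trailing while-padding loop.
import Mathlib
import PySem

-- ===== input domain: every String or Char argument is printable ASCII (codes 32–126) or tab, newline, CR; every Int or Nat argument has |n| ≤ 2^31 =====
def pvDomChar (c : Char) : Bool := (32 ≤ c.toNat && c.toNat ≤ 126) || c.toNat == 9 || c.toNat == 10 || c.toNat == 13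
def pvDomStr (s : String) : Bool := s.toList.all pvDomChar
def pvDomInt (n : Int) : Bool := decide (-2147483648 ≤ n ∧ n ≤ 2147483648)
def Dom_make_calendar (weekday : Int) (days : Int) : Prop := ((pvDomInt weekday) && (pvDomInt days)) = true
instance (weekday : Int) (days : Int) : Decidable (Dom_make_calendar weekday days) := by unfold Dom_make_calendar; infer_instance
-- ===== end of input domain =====

-- B rebuilds the calendar by materialising the flat list of day cells and chunking it into
-- 7-cell rows (padding only the last), instead of A's cell-by-cell accumulate-and-flush loop;
-- objective: alternative decomposition, same exact return value.

-- ===== PORT A =====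
-- A-side helper: the trailing 'while len(week) != 7' padding loop; fuel bounds the iteration
-- count (the loop runs at most 7 times because week always has ≤ 7 cells when it is reached,
-- so fuel 8 is exact there).
def aPadLoop : Nat → List (List String) → List String → List (List String)
  | 0, table, _ => table
  | fuel + 1, table, week =>
    if week.length == 7 then table ++ [week]
    else if week.length == 0 then table
    else aPadLoop fuel table (week ++ ["  "])

def make_calendar (weekday : Int) (days : Int) : List (List String) :=
  -- for day in range(7): build the first week and the running current_day
  let p1 := (PySem.List.pyRange 0 7 1).foldl
    (fun (s : List String × Int) day =>
      if weekday ≤ day then (s.1 ++ ["0" ++ PySem.Int.toStr s.2], s.2 + 1)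
      else (s.1 ++ ["  "], s.2)) ([], 1)
  -- for day in range(current_day, days + 1): accumulate weeks, flushing at 7 cells
  let p2 := (PySem.List.pyRange p1.2 (days + 1) 1).foldl
    (fun (s : List (List String) × List String) day =>
      if s.2.length == 6 then
        (s.1 ++ [s.2 ++ [if day < 10 then "0" ++ PySem.Int.toStr day else PySem.Int.toStr day]],
         ([] : List String))
      else
        (s.1, s.2 ++ [if day < 10 then "0" ++ PySem.Int.toStr day else PySem.Int.toStr day]))
    ([p1.1], [])
  -- while len(week) != 7: … ; table.append(week); return table
  aPadLoop 8 p2.1 p2.2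

-- ===== PORT B =====
def make_calendar_alt (weekday : Int) (days : Int) : List (List String) :=
  let blanks : Int := min (max weekday 0) 7
  let first_week : List String :=
    PySem.List.pyRepeat ["  "] blanks ++
      (PySem.List.pyRange 1 (8 - blanks) 1).map (fun i => "0" ++ PySem.Int.toStr i)
  let start : Int := 8 - blanks
  let cells : List String :=
    (PySem.List.pyRange start (days + 1) 1).map
      (fun d => if d < 10 then "0" ++ PySem.Int.toStr d else PySem.Int.toStr d)
  let rows : List (List String) :=
    (PySem.List.pyRange 0 (cells.length : Int) 7).map
      (fun i => PySem.List.slice cells (some i) (some (i + 7)))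
  let rows2 : List (List String) :=
    if rows.length ≠ 0 ∧ (PySem.List.pyGetD rows (-1) []).length < 7 then
      PySem.List.slice rows none (some (-1)) ++
        [PySem.List.pyGetD rows (-1) [] ++
          PySem.List.pyRepeat ["  "] (7 - ((PySem.List.pyGetD rows (-1) []).length : Int))]
    else rows
  [first_week] ++ rows2

-- ===== PRECONDITION & SPEC =====
def Spec_make_calendar (weekday : Int) (days : Int) (out : List (List String)) : Prop := out = make_calendar_alt weekday days
instance (weekday : Int) (days : Int) (out : List (List String)) : Decidable (Spec_make_calendar weekday days out) := by unfold Spec_make_calendar; infer_instance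

-- ===== CLAIM (what is proved, stated in full; the proofs are below) =====
def Claim_equal_make_calendar : Prop := ∀ (weekday : Int) (days : Int), Dom_make_calendar weekday days → Spec_make_calendar weekday days (make_calendar weekday days)

-- ===== LEMMAS AND PROOFS =====

-- the cell formatter shared by both second passes
def fmtCell (d : Int) : String := if d < 10 then "0" ++ PySem.Int.toStr d else PySem.Int.toStr d

-- A's second-loop step, expressed on the formatted cell
def stepA (s : List (List String) × List String) (c : String) : List (List String) × List String :=
  if s.2.length == 6 then (s.1 ++ [s.2 ++ [c]], ([] : List String)) else (s.1, s.2 ++ [c])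

-- B's last-row patch, as a named function (definitionally the rows2 expression of the port)
def patchRows (R : List (List String)) : List (List String) :=
  if R.length ≠ 0 ∧ (PySem.List.pyGetD R (-1) []).length < 7 then
    PySem.List.slice R none (some (-1)) ++
      [PySem.List.pyGetD R (-1) [] ++
        PySem.List.pyRepeat ["  "] (7 - ((PySem.List.pyGetD R (-1) []).length : Int))]
  else R

-- simple recursive chunkings used as the meeting point of the two programs
def chunksNoPad (L : List String) : List (List String) :=
  if _h : L.length ≤ 7 then (if L.isEmpty then [] else [L])
  else L.take 7 :: chunksNoPad (L.drop 7)
  termination_by L.length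
  decreasing_by simp; omega

def chunksPad (L : List String) : List (List String) :=
  if _h : L.length ≤ 7 then (if L.isEmpty then [] else [L ++ List.replicate (7 - L.length) "  "])
  else L.take 7 :: chunksPad (L.drop 7)
  termination_by L.length
  decreasing_by simp; omega

lemma chunksNoPad_small (L : List String) (h : L.length ≤ 7) :
    chunksNoPad L = if L.isEmpty then [] else [L] := by
  rw [chunksNoPad]; simp [h]

lemma chunksNoPad_big (L : List String) (h : ¬ L.length ≤ 7) :
    chunksNoPad L = L.take 7 :: chunksNoPad (L.drop 7) := by
  rw [chunksNoPad]; simp [h]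

lemma chunksPad_small (L : List String) (h : L.length ≤ 7) :
    chunksPad L = if L.isEmpty then [] else [L ++ List.replicate (7 - L.length) "  "] := by
  rw [chunksPad]; simp [h]

lemma chunksPad_big (L : List String) (h : ¬ L.length ≤ 7) :
    chunksPad L = L.take 7 :: chunksPad (L.drop 7) := by
  rw [chunksPad]; simp [h]

-- ---- A side: the accumulate-and-flush fold followed by the pad loop computes chunksPad ----

lemma foldl_stepA_small (L : List String) : ∀ (t : List (List String)) (w : List String),
    w.length + L.length ≤ 6 → L.foldl stepA (t, w) = (t, w ++ L) := by
  induction L with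
  | nil => intro t w _; simp
  | cons c L ih =>
      intro t w h
      simp only [List.length_cons] at h
      have hs : stepA (t, w) c = (t, w ++ [c]) := by
        simp only [stepA]
        have h6 : (w.length == 6) = false := by simp; omega
        simp [h6]
      simp only [List.foldl_cons, hs]
      rw [ih t (w ++ [c]) (by simp; omega)]
      simp

lemma aPadLoop_nil (f : Nat) (t : List (List String)) : aPadLoop (f + 1) t [] = t := by
  simp [aPadLoop]

lemma aPadLoop_run : ∀ (k f : Nat) (t : List (List String)) (w : List String),
    w.length + k = 7 → 1 ≤ w.length → k < f →
    aPadLoop f t w = t ++ [w ++ List.replicate k "  "] := by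
  intro k
  induction k with
  | zero =>
      intro f t w h7 _ hf
      cases f with
      | zero => omega
      | succ f =>
        have h7' : (w.length == 7) = true := by simp; omega
        simp [aPadLoop, h7']
  | succ k ih =>
      intro f t w h7 h1 hf
      cases f with
      | zero => omega
      | succ f =>
        have ha : (w.length == 7) = false := by simp; omega
        have hb : (w.length == 0) = false := by rw [beq_eq_false_iff_ne]; omega
        simp only [aPadLoop, ha, hb, Bool.false_eq_true, if_false]
        rw [ih f t (w ++ ["  "]) (by simp; omega) (by simp) (by omega)]
        simp [List.replicate_succ]

lemma finish_foldl_stepA (n : Nat) : ∀ (L : List String), L.length = n → ∀ (t : List (List String)),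
    aPadLoop 8 (L.foldl stepA (t, [])).1 (L.foldl stepA (t, [])).2 = t ++ chunksPad L := by
  induction n using Nat.strong_induction_on with
  | _ n ih =>
  intro L hL t
  rcases Nat.lt_or_ge L.length 7 with h7 | h7
  · rcases Nat.eq_zero_or_pos L.length with h0 | h0
    · have hnil : L = [] := List.eq_nil_of_length_eq_zero h0
      subst hnil
      rw [chunksPad_small [] (by simp)]
      simp only [List.foldl_nil]
      rw [show (8:Nat) = 7 + 1 from rfl, aPadLoop_nil]
      simp
    · rw [foldl_stepA_small L t [] (by simp; omega)]
      simp only [List.nil_append]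
      rw [aPadLoop_run (7 - L.length) 8 t L (by omega) (by omega) (by omega)]
      rw [chunksPad_small L (by omega)]
      have hne : L.isEmpty = false := by
        simp; intro hh; subst hh; simp at h0
      simp [hne]
  · have hTlen : (L.take 7).length = 7 := by simp; omega
    obtain ⟨a, c, hac⟩ : ∃ a c, L.take 7 = a ++ [c] := by
      rcases List.eq_nil_or_concat (L.take 7) with h | ⟨a, c, h⟩
      · rw [h] at hTlen; simp at hTlen
      · exact ⟨a, c, by simpa [List.concat_eq_append] using h⟩
    have halen : a.length = 6 := by
      have h' := hTlen; rw [hac] at h'; simp at h'; omega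
    have hfold : L.foldl stepA (t, []) = (L.drop 7).foldl stepA (t ++ [L.take 7], []) := by
      conv_lhs => rw [← List.take_append_drop 7 L]
      rw [List.foldl_append, hac, List.foldl_append]
      rw [foldl_stepA_small a t [] (by simp; omega)]
      simp only [List.nil_append, List.foldl_cons, List.foldl_nil]
      have hs : stepA (t, a) c = (t ++ [a ++ [c]], []) := by
        have h6 : (a.length == 6) = true := by simp [halen]
        simp [stepA, h6]
      rw [hs, ← hac]
    rw [hfold]
    rw [ih (L.drop 7).length (by simp; omega) (L.drop 7) rfl (t ++ [L.take 7])]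
    rcases Nat.eq_or_lt_of_le h7 with heq | hlt
    · have hR0 : L.drop 7 = [] := by
        apply List.eq_nil_of_length_eq_zero; simp; omega
      have hTL : L.take 7 = L := List.take_of_length_le (by omega)
      rw [hR0, hTL, chunksPad_small L (by omega), chunksPad_small [] (by simp)]
      have hne : L.isEmpty = false := by
        simp; intro hh; rw [hh] at heq; simp at heq
      simp [hne, show 7 - L.length = 0 from by omega]
    · rw [chunksPad_big L (by omega)]
      simp

-- ---- B side: the slice-chunking rows equal chunksNoPad, and the last-row patch pads them ----

lemma rowsSpec_eq_chunksNoPad (n : Nat) : ∀ (L : List String), L.length = n →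
    (List.range ((L.length + 6) / 7)).map (fun k => (L.drop (7 * k)).take 7) = chunksNoPad L := by
  induction n using Nat.strong_induction_on with
  | _ n ih =>
  intro L hL
  rcases Nat.lt_or_ge L.length 8 with h8 | h8
  · rcases Nat.eq_zero_or_pos L.length with h0 | h0
    · have hnil : L = [] := List.eq_nil_of_length_eq_zero h0
      subst hnil
      rw [chunksNoPad_small [] (by simp)]
      simp
    · have hm : (L.length + 6) / 7 = 1 := by omega
      rw [hm, show List.range 1 = [0] from rfl]
      have hne : L.isEmpty = false := by
        simp; intro hh; subst hh; simp at h0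
      rw [chunksNoPad_small L (by omega)]
      simp [hne, List.take_of_length_le (show L.length ≤ 7 from by omega)]
  · have hm : (L.length + 6) / 7 = ((L.drop 7).length + 6) / 7 + 1 := by simp; omega
    rw [hm, List.range_succ_eq_map, List.map_cons, List.map_map]
    rw [chunksNoPad_big L (by omega)]
    have hI := ih (L.drop 7).length (by simp; omega) (L.drop 7) rfl
    have htail : List.map ((fun k => List.take 7 (List.drop (7 * k) L)) ∘ Nat.succ)
        (List.range (((L.drop 7).length + 6) / 7)) = chunksNoPad (L.drop 7) := by
      rw [← hI]
      apply List.map_congr_left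
      intro k _
      simp only [Function.comp_apply, List.drop_drop]
      congr 2
      omega
    rw [htail]
    simp

lemma rows_eq_chunksNoPad (L : List String) :
    (PySem.List.pyRange 0 (L.length : Int) 7).map
      (fun i => PySem.List.slice L (some i) (some (i + 7))) = chunksNoPad L := by
  rw [PySem.List.pyRange_of_pos 0 (L.length : Int) (by norm_num)]
  rcases Nat.eq_zero_or_pos L.length with h0 | h0
  · have hnil : L = [] := List.eq_nil_of_length_eq_zero h0
    subst hnil
    rw [chunksNoPad_small [] (by simp)]
    simp
  · rw [if_pos (by exact_mod_cast h0 : (0:Int) < (L.length : Int))]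
    have hcount : (((L.length : Int) - 0 + 7 - 1) / 7).toNat = (L.length + 6) / 7 := by omega
    rw [hcount, List.map_map, ← rowsSpec_eq_chunksNoPad L.length L rfl]
    apply List.map_congr_left
    intro k _
    simp only [Function.comp_apply]
    rw [show (0 : Int) + 7 * (k : Int) + 7 = ((7 * k : Nat) : Int) + ((7 : Nat) : Int) from by
          push_cast; ring,
        show (0 : Int) + 7 * (k : Int) = ((7 * k : Nat) : Int) from by push_cast; ring]
    exact PySem.List.slice_natCast_add L (7 * k) 7

lemma chunksNoPad_ne_nil (L : List String) (h : L ≠ []) : chunksNoPad L ≠ [] := by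
  rcases Nat.lt_or_ge L.length 8 with h8 | h8
  · rw [chunksNoPad_small L (by omega)]
    simp [List.isEmpty_iff, h]
  · rw [chunksNoPad_big L (by omega)]
    simp

lemma patch_cons (a : List String) (R : List (List String)) (hR : R ≠ []) :
    patchRows (a :: R) = a :: patchRows R := by
  simp only [patchRows]
  have hlast : PySem.List.pyGetD (a :: R) (-1) ([] : List String)
      = PySem.List.pyGetD R (-1) ([] : List String) := by
    rw [PySem.List.pyGetD_neg_one _ _ (by simp), PySem.List.pyGetD_neg_one _ _ hR]
    exact List.getLast_cons hR
  have hR0 : R.length ≠ 0 := by simpa [List.length_eq_zero_iff] using hR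
  rw [hlast, PySem.List.slice_to_neg_one, PySem.List.slice_to_neg_one,
      List.dropLast_cons_of_ne_nil hR]
  simp only [List.length_cons, hR0, Nat.succ_ne_zero, ne_eq, not_false_eq_true, true_and]
  split_ifs with hc
  · simp
  · rfl

lemma patch_single (L : List String) :
    patchRows [L] = if L.length < 7 then [L ++ List.replicate (7 - L.length) "  "] else [L] := by
  simp only [patchRows]
  rw [PySem.List.pyGetD_neg_one _ _ (by simp : ([L] : List (List String)) ≠ [])]
  simp only [List.getLast_singleton, PySem.List.slice_to_neg_one,
    PySem.List.pyRepeat_singleton, List.length_cons, List.length_nil, ne_eq, Nat.succ_ne_zero,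
    not_false_eq_true, true_and]
  split_ifs with hc
  · simp [show ((7 : Int) - (L.length : Int)).toNat = 7 - L.length from by omega]
  · rfl

lemma patch_chunksNoPad (n : Nat) : ∀ (L : List String), L.length = n →
    patchRows (chunksNoPad L) = chunksPad L := by
  induction n using Nat.strong_induction_on with
  | _ n ih =>
  intro L hL
  rcases Nat.lt_or_ge L.length 8 with h8 | h8
  · rcases Nat.eq_zero_or_pos L.length with h0 | h0
    · have hnil : L = [] := List.eq_nil_of_length_eq_zero h0
      subst hnil
      rw [chunksNoPad_small [] (by simp), chunksPad_small [] (by simp)]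
      simp [patchRows]
    · have hne : L.isEmpty = false := by
        simp; intro hh; subst hh; simp at h0
      rw [chunksNoPad_small L (by omega), chunksPad_small L (by omega)]
      simp only [hne, Bool.false_eq_true, if_false]
      rw [patch_single]
      split_ifs with hc
      · rfl
      · simp [show 7 - L.length = 0 from by omega]
  · have hdrop : L.drop 7 ≠ [] := by
      intro hh
      have := congrArg List.length hh
      simp at this; omega
    rw [chunksNoPad_big L (by omega),
        patch_cons _ _ (chunksNoPad_ne_nil _ hdrop),
        ih (L.drop 7).length (by simp; omega) (L.drop 7) rfl,
        chunksPad_big L (by omega)]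

-- ---- first loop: closed form of week and current_day ----

lemma firstLoop_eq (weekday : Int) :
    (PySem.List.pyRange 0 7 1).foldl
      (fun (s : List String × Int) day =>
        if weekday ≤ day then (s.1 ++ ["0" ++ PySem.Int.toStr s.2], s.2 + 1)
        else (s.1 ++ ["  "], s.2)) ([], 1)
      = (PySem.List.pyRepeat ["  "] (min (max weekday 0) 7) ++
          (PySem.List.pyRange 1 (8 - min (max weekday 0) 7) 1).map
            (fun i => "0" ++ PySem.Int.toStr i),
         8 - min (max weekday 0) 7) := by
  rw [show PySem.List.pyRange 0 7 1 = [0, 1, 2, 3, 4, 5, 6] from by decide]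
  rcases (by omega : weekday ≤ 0 ∨ 0 < weekday) with h | h
  · rw [show min (max weekday 0) 7 = 0 from by omega]
    simp only [List.foldl_cons, List.foldl_nil,
      show weekday ≤ (0:Int) from by omega, show weekday ≤ (1:Int) from by omega,
      show weekday ≤ (2:Int) from by omega, show weekday ≤ (3:Int) from by omega,
      show weekday ≤ (4:Int) from by omega, show weekday ≤ (5:Int) from by omega,
      show weekday ≤ (6:Int) from by omega, if_pos]
    decide
  · rcases (by omega : 7 ≤ weekday ∨ weekday < 7) with h7 | h7
    · rw [show min (max weekday 0) 7 = 7 from by omega]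
      simp only [List.foldl_cons, List.foldl_nil,
        show ¬ weekday ≤ (0:Int) from by omega, show ¬ weekday ≤ (1:Int) from by omega,
        show ¬ weekday ≤ (2:Int) from by omega, show ¬ weekday ≤ (3:Int) from by omega,
        show ¬ weekday ≤ (4:Int) from by omega, show ¬ weekday ≤ (5:Int) from by omega,
        show ¬ weekday ≤ (6:Int) from by omega, if_neg, not_false_eq_true]
      decide
    · have h1 : 1 ≤ weekday := h
      have h2 : weekday ≤ 6 := by omega
      interval_cases weekday <;> decide

-- ---- assembling the two sides ----

lemma make_calendar_alt_eq (weekday days : Int) :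
    make_calendar_alt weekday days =
      [PySem.List.pyRepeat ["  "] (min (max weekday 0) 7) ++
        (PySem.List.pyRange 1 (8 - min (max weekday 0) 7) 1).map
          (fun i => "0" ++ PySem.Int.toStr i)] ++
      patchRows
        ((PySem.List.pyRange 0
            ((((PySem.List.pyRange (8 - min (max weekday 0) 7) (days + 1) 1).map
              fmtCell).length : Nat) : Int) 7).map
          (fun i => PySem.List.slice
            ((PySem.List.pyRange (8 - min (max weekday 0) 7) (days + 1) 1).map fmtCell)
            (some i) (some (i + 7)))) := rfl

theorem make_calendar_spec_aux (weekday days : Int) :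
    make_calendar weekday days = make_calendar_alt weekday days := by
  rw [make_calendar_alt_eq]
  unfold make_calendar
  simp only []
  rw [firstLoop_eq weekday]
  simp only []
  rw [show
    (fun (s : List (List String) × List String) (day : Int) =>
      if s.2.length == 6 then
        (s.1 ++ [s.2 ++ [if day < 10 then "0" ++ PySem.Int.toStr day else PySem.Int.toStr day]],
         ([] : List String))
      else
        (s.1, s.2 ++ [if day < 10 then "0" ++ PySem.Int.toStr day else PySem.Int.toStr day]))
    = (fun s day => stepA s (fmtCell day)) from rfl]
  rw [← List.foldl_map (f := fmtCell) (g := stepA)]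
  rw [finish_foldl_stepA ((PySem.List.pyRange (8 - min (max weekday 0) 7) (days + 1) 1).map
        fmtCell).length _ rfl]
  rw [rows_eq_chunksNoPad, patch_chunksNoPad ((PySem.List.pyRange (8 - min (max weekday 0) 7)
        (days + 1) 1).map fmtCell).length _ rfl]

-- ===== VERDICT (by name: the statement is the Claim_ definition above) =====
theorem make_calendar_spec : Claim_equal_make_calendar := by
  unfold Claim_equal_make_calendar
  intro weekday days _
  unfold Spec_make_calendar
  exact make_calendar_spec_aux weekday days
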